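-- pv_equiv track=rewrite | github.com/abao929/fwf | sudoku.py | get_columns
-- ===== SOURCE A (Python) =====
-- def get_bits(arr):
--     arr_bits = 0
--     for bit in range(0, 9):
--         if arr[bit] > 0:
--             arr_bits += 2 ** (arr[bit] - 1)
--     return arr_bits
--
-- def get_columns(arr_num):
--     col_arr = []
--     for col in range(0, 3):
--         col_nums = []
--         for row in range(0, 9):
--             col_nums.append(sample[row][((arr_num % 3) * 3) + col])
--         col_arr.append(get_bits(col_nums))
--     return col_arr
--
-- sample = [[0, 2, 0,  0, 0, 0,  0, 0, 0],
--          [0, 0, 0,  6, 0, 0,  0, 0, 3],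
--          [0, 7, 4,  0, 8, 0,  0, 0, 0],
--          [0, 0, 0,  0, 0, 3,  0, 0, 2],
--          [0, 8, 0,  0, 4, 0,  0, 1, 0],
--          [6, 0, 0,  5, 0, 0,  0, 0, 0],
--          [0, 0, 0,  0, 1, 0,  7, 8, 0],
--          [5, 0, 0,  0, 0, 9,  0, 0, 0],
--          [0, 0, 0,  0, 0, 0,  0, 4, 0]]
-- ===== SOURCE B (Python) =====
-- sample = [[0, 2, 0,  0, 0, 0,  0, 0, 0],
--          [0, 0, 0,  6, 0, 0,  0, 0, 3],
--          [0, 7, 4,  0, 8, 0,  0, 0, 0],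
--          [0, 0, 0,  0, 0, 3,  0, 0, 2],
--          [0, 8, 0,  0, 4, 0,  0, 1, 0],
--          [6, 0, 0,  5, 0, 0,  0, 0, 0],
--          [0, 0, 0,  0, 1, 0,  7, 8, 0],
--          [5, 0, 0,  0, 0, 9,  0, 0, 0],
--          [0, 0, 0,  0, 0, 0,  0, 4, 0]]
--
-- # All 9 column bitmasks, built once by a single row-major sweep over the grid.
-- _COL_MASKS = [0] * 9
-- for _row in sample:
--     for _c, _v in enumerate(_row):
--         if _v > 0:
--             _COL_MASKS[_c] |= 1 << (_v - 1)
--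
-- def get_columns(arr_num):
--     base = (arr_num % 3) * 3
--     return _COL_MASKS[base:base + 3]
-- ===== Notes on version B (the rewrite author's own statement) =====
-- stated objective: alternative
-- what changed: B replaces the per-call per-column column scans with a table: one row-major sweep over the whole grid precomputes every column's mask once at module load, and get_columns merely slices three consecutive entries out of that table.
import Mathlib
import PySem

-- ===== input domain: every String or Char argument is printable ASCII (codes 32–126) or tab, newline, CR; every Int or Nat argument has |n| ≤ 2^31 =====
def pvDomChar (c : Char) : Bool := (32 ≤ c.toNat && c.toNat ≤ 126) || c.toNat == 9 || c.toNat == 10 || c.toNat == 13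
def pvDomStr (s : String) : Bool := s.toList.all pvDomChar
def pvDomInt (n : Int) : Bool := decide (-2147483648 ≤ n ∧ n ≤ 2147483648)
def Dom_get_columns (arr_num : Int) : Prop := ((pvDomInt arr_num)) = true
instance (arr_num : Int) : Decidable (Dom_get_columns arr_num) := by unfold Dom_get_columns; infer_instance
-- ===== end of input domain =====

-- B precomputes every column mask in one row-major sweep and answers each call with a three-element slice of that table (alternative decomposition; same values).
-- ===== PORT A =====
def sample : List (List Int) :=
  [[0, 2, 0, 0, 0, 0, 0, 0, 0],
   [0, 0, 0, 6, 0, 0, 0, 0, 3],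
   [0, 7, 4, 0, 8, 0, 0, 0, 0],
   [0, 0, 0, 0, 0, 3, 0, 0, 2],
   [0, 8, 0, 0, 4, 0, 0, 1, 0],
   [6, 0, 0, 5, 0, 0, 0, 0, 0],
   [0, 0, 0, 0, 1, 0, 7, 8, 0],
   [5, 0, 0, 0, 0, 9, 0, 0, 0],
   [0, 0, 0, 0, 0, 0, 0, 4, 0]]

-- indices are always in range here, so pyGetD with default 0 is exact
def get_bits (arr : List Int) : Int :=
  (PySem.List.pyRange 0 9 1).foldl
    (fun arr_bits bit =>
      if PySem.List.pyGetD arr bit 0 > 0 then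
        arr_bits + 2 ^ (PySem.List.pyGetD arr bit 0 - 1).toNat
      else arr_bits) 0

def get_columns (arr_num : Int) : List Int :=
  (PySem.List.pyRange 0 3 1).foldl
    (fun col_arr col =>
      let col_nums :=
        (PySem.List.pyRange 0 9 1).foldl
          (fun cn row =>
            cn ++ [PySem.List.pyGetD (PySem.List.pyGetD sample row [])
                     ((PySem.Int.mod arr_num 3) * 3 + col) 0]) []
      col_arr ++ [get_bits col_nums]) []

-- ===== PORT B =====
-- the enumerate index is always a valid nonneg position of the 9-wide row, so List.set at .toNat is exact
def colMasks : List Int :=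
  sample.foldl
    (fun masks row =>
      (PySem.List.enumerate row).foldl
        (fun ms cv =>
          if cv.2 > 0 then
            ms.set cv.1.toNat (PySem.Int.bor (PySem.List.pyGetD ms cv.1 0) (2 ^ (cv.2 - 1).toNat))
          else ms)
        masks)
    (List.replicate 9 0)

def get_columns_alt (arr_num : Int) : List Int :=
  let base := (PySem.Int.mod arr_num 3) * 3
  PySem.List.slice colMasks (some base) (some (base + 3))

-- ===== PRECONDITION & SPEC =====
def Spec_get_columns (arr_num : Int) (out : List Int) : Prop := out = get_columns_alt arr_num
instance (arr_num : Int) (out : List Int) : Decidable (Spec_get_columns arr_num out) := by unfold Spec_get_columns; infer_instance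

-- ===== CLAIM =====
def Claim_equal_get_columns : Prop := ∀ (arr_num : Int), Dom_get_columns arr_num → Spec_get_columns arr_num (get_columns arr_num)

-- ===== LEMMAS AND PROOFS =====
lemma mod3_cases (n : Int) :
    PySem.Int.mod n 3 = 0 ∨ PySem.Int.mod n 3 = 1 ∨ PySem.Int.mod n 3 = 2 := by
  have h1 := PySem.Int.mod_nonneg n (b := 3) (by norm_num)
  have h2 := PySem.Int.mod_lt n (b := 3) (by norm_num)
  omega

-- ===== VERDICT =====
theorem get_columns_spec : Claim_equal_get_columns := by
  intro n _
  unfold Spec_get_columns get_columns get_columns_alt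
  rcases mod3_cases n with h | h | h <;> simp only [h] <;> decide
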